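-- pv_equiv track=rewrite | github.com/kimmw1999/RHIT | csse120/csse120-202020-kimmw/16-Exam2-202020/src/problem3.py | problem3a
-- ===== SOURCE A (Python) =====
-- def problem3a(sequence, r):
--     """
--     What comes in: A sequence of numbers and an integer r.
--         You may assume that the sequence contains at least r numbers.
--     What goes out:
--         -- Returns the LARGEST of the LAST r numbers in the sequence.
--             If r is 0, returns None.
--     Side effects:   None.
--     Examples:
--         -- problem3a( [30, 1, 22, 7, 5],  4 )
--                returns 22
--             (which is the largest out of 1, 22, 7, and 5)
--         -- problem3a( [5, 20, 0, 0, 0, 0, 0, 0, 0],  7 )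
--                returns 0
--             (which is the largest out of 0, 0, 0, 0, 0, 0, and 0)
--         -- problem3a( [100, -4, -11, -2, -4, -4],  5 )
--                returns -2
--             (which is the largest out of -4, -11, -2, -4, and -4)
--         -- problem3a( [4, 3, 2, 1, 0],  1 )
--                returns 0
--             (which is the largest out of 0)
--         -- problem3a( [1, 2, 15, 21],  0 )
--                returns None
--             (since r equals 0)
--     """
--     # -------------------------------------------------------------------------
--     # DONE: 2. Implement and test this function.
--     #          Tests have been written for you (above).
--     #   ** IMPORTANT NOTE:
--     #      You may NOT use the builtin   max   function on this problem,
--     #      nor may you use slices (if you know what they are). **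
--     # -------------------------------------------------------------------------
--     if r==0:
--         return None
--     largest=sequence[-1]
--     for k in range(-2, -r-1, -1):
--         if sequence[k]>largest:
--             largest=sequence[k]
--     return largest
-- ===== SOURCE B (Python) =====
-- def problem3a(sequence, r):
--     if r == 0:
--         return None
--     return sorted(sequence[-r:])[-1]
-- ===== Notes on version B (the rewrite author's own statement) =====
-- stated objective: simpler
-- what changed: Replaces the backward index scan with a running maximum by slicing the last r elements, sorting them and taking the final element.
-- outside the precondition, e.g. on problem3a([1, 5, 2], -1): A returns 2, B returns 5; on problem3a([1, 2, 3], -5): A returns 3, B raises IndexError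
import Mathlib
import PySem

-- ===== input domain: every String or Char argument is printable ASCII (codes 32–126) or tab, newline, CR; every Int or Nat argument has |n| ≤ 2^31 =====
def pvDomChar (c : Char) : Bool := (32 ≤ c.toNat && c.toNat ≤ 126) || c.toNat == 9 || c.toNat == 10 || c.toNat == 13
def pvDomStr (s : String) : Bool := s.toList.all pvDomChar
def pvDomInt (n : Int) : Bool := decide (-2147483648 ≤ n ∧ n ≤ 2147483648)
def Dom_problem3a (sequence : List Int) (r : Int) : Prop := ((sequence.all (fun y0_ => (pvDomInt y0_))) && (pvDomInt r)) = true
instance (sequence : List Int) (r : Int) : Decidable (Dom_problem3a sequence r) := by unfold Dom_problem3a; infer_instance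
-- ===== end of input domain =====

-- B sorts the last r elements and takes the final one, instead of A's backward scan with a running maximum (simpler; same return value on 0 ≤ r ≤ len).

-- ===== PORT A =====
def problem3a (sequence : List Int) (r : Int) : Option Int :=
  if r = 0 then none
  else
    (PySem.List.pyGet? sequence (-1)).bind (fun largest0 =>   -- none = IndexError on sequence[-1]
      (PySem.List.pyRange (-2) (-r - 1) (-1)).foldl
        (fun acc k =>
          match acc, PySem.List.pyGet? sequence k with
          | some largest, some v => some (if v > largest then v else largest)
          | _, _ => none)   -- none = IndexError on sequence[k]
        (some largest0))

-- ===== PORT B =====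
def problem3a_alt (sequence : List Int) (r : Int) : Option Int :=
  if r = 0 then none
  else
    PySem.List.pyGet?
      (PySem.List.sorted (PySem.List.slice sequence (some (-r)) none) (fun x => x) false)
      (-1)

-- ===== PRECONDITION & SPEC =====
-- Pre_ restricts to the task's natural domain 0 ≤ r ≤ len(sequence) (the docstring assumes the
-- sequence contains at least r numbers): for negative r A's loop body never runs and it
-- accidentally returns the last element, and for r > len(sequence) (or r ≠ 0 with an empty
-- sequence) A raises IndexError.
def Pre_problem3a (sequence : List Int) (r : Int) : Prop :=
  0 ≤ r ∧ r ≤ (sequence.length : Int)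
instance (sequence : List Int) (r : Int) : Decidable (Pre_problem3a sequence r) := by
  unfold Pre_problem3a; infer_instance

def pvWitness_problem3a : List Int × Int := ([30, 1, 22, 7, 5], 4)

def Spec_problem3a (sequence : List Int) (r : Int) (out : Option Int) : Prop := out = problem3a_alt sequence r
instance (sequence : List Int) (r : Int) (out : Option Int) : Decidable (Spec_problem3a sequence r out) := by unfold Spec_problem3a; infer_instance

-- ===== CLAIM (what is proved, stated in full; the proofs are below) =====
def Claim_equal_problem3a : Prop := ∀ (sequence : List Int) (r : Int), Dom_problem3a sequence r → Pre_problem3a sequence r → Spec_problem3a sequence r (problem3a sequence r)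

-- ===== LEMMAS AND PROOFS =====

-- the last element of a ≤-sorted list is an upper bound
theorem pv_getLast?_ub (l : List Int) (m : Int) (hp : l.Pairwise (· ≤ ·))
    (hm : l.getLast? = some m) : ∀ x ∈ l, x ≤ m := by
  induction l with
  | nil => simp at hm
  | cons a t ih =>
    intro x hx
    cases t with
    | nil =>
      simp at hm hx
      omega
    | cons b t' =>
      rw [List.getLast?_cons_cons] at hm
      rcases List.mem_cons.mp hx with rfl | hxt
      · exact (List.pairwise_cons.mp hp).1 m (List.mem_of_getLast? hm)
      · exact ih (List.pairwise_cons.mp hp).2 hm x hxt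

-- A's option-threaded fold succeeds and computes a running max of the indexed values
theorem pv_fold_some (seq : List Int) (ks : List Int) (acc : Int)
    (h : ∀ k ∈ ks, (PySem.List.pyGet? seq k).isSome) :
    ks.foldl
      (fun acc k =>
        match acc, PySem.List.pyGet? seq k with
        | some largest, some v => some (if v > largest then v else largest)
        | _, _ => none) (some acc)
    = some ((ks.map (fun k => PySem.List.pyGetD seq k 0)).foldl max acc) := by
  induction ks generalizing acc with
  | nil => simp
  | cons a l ih =>
    obtain ⟨v, hv⟩ := Option.isSome_iff_exists.mp (h a (by simp))
    have hvD : PySem.List.pyGetD seq a 0 = v := by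
      simp [PySem.List.pyGetD, hv]
    have hmax : (if v > acc then v else acc) = max acc v := by
      rcases lt_or_ge acc v with hlt | hge
      · simp [hlt, max_eq_right hlt.le]
      · simp [not_lt.mpr hge, max_eq_left hge]
    simp only [List.foldl_cons, List.map_cons, hv, hvD, hmax]
    exact ih _ (fun k hk => h k (by simp [hk]))

theorem pv_aux (sequence : List Int) (ρ : Nat) (hρ1 : 1 ≤ ρ) (hρn : ρ ≤ sequence.length) :
    problem3a sequence (ρ : Int) = problem3a_alt sequence (ρ : Int) := by
  obtain ⟨t, ht⟩ : ∃ t, List.drop (sequence.length - ρ) sequence = t := ⟨_, rfl⟩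
  have htlen : t.length = ρ := by rw [← ht]; simp; omega
  have htne : t ≠ [] := by intro h; rw [h] at htlen; simp at htlen; omega
  have hslice : PySem.List.slice sequence (some (-(ρ : Int))) none = t := by
    rw [PySem.List.slice_from_neg_natCast sequence ρ (by omega), ht]
  -- B's value: the last element of sorted(t)
  have hsne : PySem.List.sorted t (fun x => x) false ≠ [] := by
    rw [Ne, PySem.List.sorted_eq_nil_iff]; exact htne
  obtain ⟨mB, hmB⟩ := Option.isSome_iff_exists.mp (List.getLast?_isSome.mpr hsne)
  have hBval : problem3a_alt sequence (ρ : Int) = some mB := by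
    unfold problem3a_alt
    rw [if_neg (by omega), hslice, PySem.List.pyGet?_neg_one, hmB]
  have hmB_mem : mB ∈ t := by
    exact (PySem.List.mem_sorted t (fun x => x) false mB).mp (List.mem_of_getLast? hmB)
  have hmB_ub : ∀ x ∈ t, x ≤ mB := by
    intro x hx
    exact pv_getLast?_ub _ mB (PySem.List.sorted_pairwise t (fun x => x)) hmB x
      ((PySem.List.mem_sorted t (fun x => x) false x).mpr hx)
  -- A's value: a running max over t's elements scanned back-to-front
  obtain ⟨v0, vtl, hv⟩ : ∃ v0 vtl, t.reverse = v0 :: vtl := by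
    cases hc : t.reverse with
    | nil => exact absurd (by simpa using congrArg List.reverse hc) htne
    | cons a l => exact ⟨a, l, rfl⟩
  have hvtlen : vtl.length = ρ - 1 := by
    have := congrArg List.length hv
    simp [htlen] at this
    omega
  have hinit : PySem.List.pyGet? sequence (-1) = some v0 := by
    rw [PySem.List.pyGet?_neg_one, ← List.take_append_drop (sequence.length - ρ) sequence, ht,
      List.getLast?_append_of_ne_nil _ htne, ← List.head?_reverse, hv]
    rfl
  have hkrange : ∀ k ∈ PySem.List.pyRange (-2) (-(ρ : Int) - 1) (-1),
      (PySem.List.pyGet? sequence k).isSome := by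
    intro k hk
    rw [PySem.List.mem_pyRange_neg_one] at hk
    rw [Option.isSome_iff_ne_none, Ne, PySem.List.pyGet?_eq_none_iff]
    intro hc
    exact hc (by simp [PySem.Raise.InRange]; omega)
  have hvals : (PySem.List.pyRange (-2) (-(ρ : Int) - 1) (-1)).map
      (fun k => PySem.List.pyGetD sequence k 0) = vtl := by
    rw [PySem.List.pyRange_neg_one]
    have hcnt : ((-2 : Int) - (-(ρ : Int) - 1)).toNat = ρ - 1 := by omega
    rw [hcnt]
    apply List.ext_getElem
    · simp [hvtlen]
    · intro j hj1 hj2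
      have hjρ : j < ρ - 1 := by simpa using hj1
      simp only [List.map_map, List.getElem_map, List.getElem_range, Function.comp]
      have hidx : (-2 : Int) - (j : Int) = -(((j + 2 : Nat) : Nat) : Int) := by push_cast; ring
      rw [hidx, PySem.List.pyGetD_neg_natCast sequence (j + 2) 0 (by omega) (by omega)]
      have hvtl : vtl[j] = t.reverse[j + 1]'(by simp [htlen]; omega) := by
        simp [hv]
      rw [hvtl, List.getElem_reverse]
      have hq : t[t.length - 1 - (j + 1)]? = sequence[sequence.length - (j + 2)]? := by
        conv_lhs => rw [← ht]
        rw [List.getElem?_drop]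
        congr 1
        simp
        omega
      rw [List.getElem?_eq_getElem (by omega), List.getElem?_eq_getElem (by omega)] at hq
      exact (Option.some.inj hq).symm
  have hAval : problem3a sequence (ρ : Int) =
      some (vtl.foldl max v0) := by
    unfold problem3a
    rw [if_neg (by omega), hinit, Option.bind_some,
      pv_fold_some sequence _ v0 hkrange, hvals]
  -- A's value is also the maximum of t
  have hmem : vtl.foldl max v0 ∈ t := by
    rw [← List.mem_reverse, hv]
    rcases PySem.List.foldl_max_mem vtl v0 with h | h
    · rw [h]; exact List.mem_cons_self
    · exact List.mem_cons_of_mem _ h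
  have hub : ∀ x ∈ t, x ≤ vtl.foldl max v0 := by
    intro x hx
    have hxv : x ∈ v0 :: vtl := by rw [← hv, List.mem_reverse]; exact hx
    rcases List.mem_cons.mp hxv with rfl | h
    · exact (PySem.List.le_foldl_max vtl x).1
    · exact (PySem.List.le_foldl_max vtl v0).2 x h
  rw [hAval, hBval]
  exact congrArg some (le_antisymm (hmB_ub _ hmem) (hub _ hmB_mem))

-- ===== VERDICT (by name: the statement is the Claim_ definition above) =====
theorem problem3a_spec : Claim_equal_problem3a := by
  intro sequence r _ hpre
  unfold Spec_problem3a
  rcases hpre with ⟨h0, hlen⟩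
  by_cases hr : r = 0
  · simp [problem3a, problem3a_alt, hr]
  · have hrρ : r = ((r.toNat : Nat) : Int) := by omega
    rw [hrρ]
    exact pv_aux sequence r.toNat (by omega) (by omega)
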